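-- pv_equiv track=rewrite | github.com/anqiXu33/shopsense | agent/context_engineer.py | _reviews_section
-- ===== SOURCE A (Python) =====
-- def _reviews_section(tool_results: dict, budget_tokens: int) -> str:
--     all_reviews = []
--     for key, val in tool_results.items():
--         if key.startswith("search_reviews") and isinstance(val, list):
--             all_reviews.extend(val)
--
--     if not all_reviews:
--         return ""
--
--     positive = [r for r in all_reviews if r.get("sentiment") == "positive"]
--     negative = [r for r in all_reviews if r.get("sentiment") == "negative"]
--     neutral  = [r for r in all_reviews if r.get("sentiment") == "neutral"]
--
--     lines = ["BUYER REVIEWS (real feedback):"]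
--     if positive:
--         lines.append("Positive:")
--         for r in positive[:3]:
--             h = f" (reviewer: {r['reviewer_height']}cm)" if r.get("reviewer_height") else ""
--             lines.append(f'  ✓ "{r["text"]}"{h}')
--     if negative:
--         lines.append("Concerns:")
--         for r in negative[:3]:
--             h = f" (reviewer: {r['reviewer_height']}cm)" if r.get("reviewer_height") else ""
--             lines.append(f'  ✗ "{r["text"]}"{h}')
--     if neutral:
--         lines.append("Neutral notes:")
--         for r in neutral[:2]:
--             lines.append(f'  · "{r["text"]}"')
--
--     return _truncate("\n".join(lines), budget_tokens)
--
-- def _truncate(text: str, max_tokens: int) -> str: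
--     """Rough truncation: 1 token ≈ 4 characters."""
--     max_chars = max_tokens * 4
--     if len(text) <= max_chars:
--         return text
--     return text[:max_chars] + "..."
-- ===== SOURCE B (Python) =====
-- def _reviews_section(tool_results: dict, budget_tokens: int) -> str:
--     # Single streaming pass: render each review's line on the fly into one of three
--     # capped buffers; no intermediate sentiment lists are ever built.
--     pos, neg, neu = [], [], []
--     seen = False
--     for key, val in tool_results.items():
--         if key.startswith("search_reviews") and isinstance(val, list):
--             for r in val:
--                 seen = True
--                 s = r.get("sentiment")
--                 if s == "positive" and len(pos) < 3:
--                     pos.append('  \u2713 "%s"%s' % (r["text"], _height_note(r)))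
--                 elif s == "negative" and len(neg) < 3:
--                     neg.append('  \u2717 "%s"%s' % (r["text"], _height_note(r)))
--                 elif s == "neutral" and len(neu) < 2:
--                     neu.append('  \u00b7 "%s"' % r["text"])
--     if not seen:
--         return ""
--     lines = ["BUYER REVIEWS (real feedback):"]
--     if pos:
--         lines += ["Positive:"] + pos
--     if neg:
--         lines += ["Concerns:"] + neg
--     if neu:
--         lines += ["Neutral notes:"] + neu
--     return _truncate("\n".join(lines), budget_tokens)
--
--
-- def _height_note(r) -> str:
--     h = r.get("reviewer_height")
--     return " (reviewer: %scm)" % h if h else ""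
--
--
-- def _truncate(text: str, max_tokens: int) -> str:
--     """Rough truncation: 1 token ~ 4 characters."""
--     max_chars = max_tokens * 4
--     if len(text) <= max_chars:
--         return text
--     return text[:max_chars] + "..."
-- ===== Notes on version B (the rewrite author's own statement) =====
-- stated objective: alternative
-- what changed: Replaced A's gather-then-three-filter-passes-then-format pipeline by a single streaming pass that renders each review's output line on the fly into three capped per-sentiment buffers (stopping at 3/3/2), so no intermediate review lists are ever built.
import Mathlib
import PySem

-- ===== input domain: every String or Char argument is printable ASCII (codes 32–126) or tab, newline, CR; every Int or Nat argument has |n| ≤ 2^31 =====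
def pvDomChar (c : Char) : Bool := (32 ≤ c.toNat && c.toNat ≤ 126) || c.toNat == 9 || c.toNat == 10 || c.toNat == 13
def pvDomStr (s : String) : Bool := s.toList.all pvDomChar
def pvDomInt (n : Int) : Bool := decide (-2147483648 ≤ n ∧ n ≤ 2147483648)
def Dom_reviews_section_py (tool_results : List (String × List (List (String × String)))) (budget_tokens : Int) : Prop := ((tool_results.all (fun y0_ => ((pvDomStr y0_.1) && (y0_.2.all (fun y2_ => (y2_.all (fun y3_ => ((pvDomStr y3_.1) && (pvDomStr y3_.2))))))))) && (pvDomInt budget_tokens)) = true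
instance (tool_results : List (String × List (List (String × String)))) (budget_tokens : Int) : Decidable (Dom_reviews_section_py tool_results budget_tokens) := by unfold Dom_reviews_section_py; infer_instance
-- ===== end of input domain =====

-- B replaces A's gather/filter/format pipeline by a single streaming pass that renders
-- each review's line on the fly into three capped buffers (objective: alternative; same cost).

-- shared module helper _truncate (used verbatim by both Pythons)
def pvTruncate (text : String) (max_tokens : Int) : String :=
  let max_chars : Int := max_tokens * 4
  if (PySem.Str.len text : Int) ≤ max_chars then text
  else PySem.Str.slice text none (some max_chars) ++ "..."

-- r.get(k) on a review dict (first-match association-list lookup)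
def pvLook (r : List (String × String)) (k : String) : Option String :=
  (PySem.Dict.mk r).get? k

-- f" (reviewer: {r['reviewer_height']}cm)" if r.get("reviewer_height") else ""   (= B's _height_note)
def pvHeightSfx (r : List (String × String)) : String :=
  match pvLook r "reviewer_height" with
  | some s => if s = "" then "" else " (reviewer: " ++ s ++ "cm)"
  | none => ""

-- r["text"]; total form, Pre_ guarantees the key is present wherever this is reached
def pvText (r : List (String × String)) : String :=
  (pvLook r "text").getD ""

-- ===== PORT A =====
-- (the isinstance(val, list) test is always true under the port's type and is dropped)
def reviews_section_py (tool_results : List (String × List (List (String × String)))) (budget_tokens : Int) : String :=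
  let all_reviews := tool_results.foldl
    (fun acc kv => if PySem.Str.startswith kv.1 "search_reviews" then acc ++ kv.2 else acc) []
  if all_reviews = [] then "" else
  let positive := all_reviews.filter (fun r => pvLook r "sentiment" == some "positive")
  let negative := all_reviews.filter (fun r => pvLook r "sentiment" == some "negative")
  let neutral  := all_reviews.filter (fun r => pvLook r "sentiment" == some "neutral")
  let lines := ["BUYER REVIEWS (real feedback):"]
  let lines := if positive ≠ [] then
      lines ++ "Positive:" :: (PySem.List.slice positive none (some 3)).map
        (fun r => "  ✓ \"" ++ pvText r ++ "\"" ++ pvHeightSfx r)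
    else lines
  let lines := if negative ≠ [] then
      lines ++ "Concerns:" :: (PySem.List.slice negative none (some 3)).map
        (fun r => "  ✗ \"" ++ pvText r ++ "\"" ++ pvHeightSfx r)
    else lines
  let lines := if neutral ≠ [] then
      lines ++ "Neutral notes:" :: (PySem.List.slice neutral none (some 2)).map
        (fun r => "  · \"" ++ pvText r ++ "\"")
    else lines
  pvTruncate (PySem.Str.join "\n" lines) budget_tokens

-- ===== PORT B =====
-- one review step of B's streaming loop: render into the matching capped buffer
def pvStepB (st : List String × List String × List String × Bool)
    (r : List (String × String)) : List String × List String × List String × Bool :=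
  match st with
  | (pos, neg, neu, _) =>
    let s := pvLook r "sentiment"
    if s = some "positive" ∧ pos.length < 3 then
      (pos ++ ["  ✓ \"" ++ pvText r ++ "\"" ++ pvHeightSfx r], neg, neu, true)
    else if s = some "negative" ∧ neg.length < 3 then
      (pos, neg ++ ["  ✗ \"" ++ pvText r ++ "\"" ++ pvHeightSfx r], neu, true)
    else if s = some "neutral" ∧ neu.length < 2 then
      (pos, neg, neu ++ ["  · \"" ++ pvText r ++ "\""], true)
    else (pos, neg, neu, true)

def reviews_section_py_alt (tool_results : List (String × List (List (String × String)))) (budget_tokens : Int) : String :=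
  let st := tool_results.foldl
    (fun st kv => if PySem.Str.startswith kv.1 "search_reviews" then kv.2.foldl pvStepB st else st)
    ([], [], [], false)
  match st with
  | (pos, neg, neu, seen) =>
    if seen = false then "" else
    let lines := ["BUYER REVIEWS (real feedback):"]
    let lines := if pos ≠ [] then lines ++ "Positive:" :: pos else lines
    let lines := if neg ≠ [] then lines ++ "Concerns:" :: neg else lines
    let lines := if neu ≠ [] then lines ++ "Neutral notes:" :: neu else lines
    pvTruncate (PySem.Str.join "\n" lines) budget_tokens

-- ===== PRECONDITION & SPEC =====
-- the reviews gathered from "search_reviews*" keys, as Pre_ talks about them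
def pvGathered (tool_results : List (String × List (List (String × String)))) : List (List (String × String)) :=
  (tool_results.filter (fun kv => PySem.Str.startswith kv.1 "search_reviews")).flatMap (·.2)

def pvBySent (tool_results : List (String × List (List (String × String)))) (s : String) : List (List (String × String)) :=
  (pvGathered tool_results).filter (fun r => pvLook r "sentiment" == some s)

-- Pre_ excludes exactly the inputs where A raises KeyError: one of the rendered reviews
-- (first 3 positive, first 3 negative, first 2 neutral gathered reviews) has no "text" key.
def Pre_reviews_section_py (tool_results : List (String × List (List (String × String)))) (budget_tokens : Int) : Prop :=
  (∀ r ∈ (pvBySent tool_results "positive").take 3, (pvLook r "text").isSome) ∧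
  (∀ r ∈ (pvBySent tool_results "negative").take 3, (pvLook r "text").isSome) ∧
  (∀ r ∈ (pvBySent tool_results "neutral").take 2, (pvLook r "text").isSome)

instance (tool_results : List (String × List (List (String × String)))) (budget_tokens : Int) : Decidable (Pre_reviews_section_py tool_results budget_tokens) := by unfold Pre_reviews_section_py; infer_instance

def pvWitness_reviews_section_py : (List (String × List (List (String × String)))) × Int :=
  ([("search_reviews", [[("sentiment", "positive"), ("text", "great fit"), ("reviewer_height", "170")],
                        [("sentiment", "neutral"), ("text", "ok")]])], 100)

def Spec_reviews_section_py (tool_results : List (String × List (List (String × String)))) (budget_tokens : Int) (out : String) : Prop := out = reviews_section_py_alt tool_results budget_tokens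
instance (tool_results : List (String × List (List (String × String)))) (budget_tokens : Int) (out : String) : Decidable (Spec_reviews_section_py tool_results budget_tokens out) := by unfold Spec_reviews_section_py; infer_instance

-- ===== CLAIM (what is proved, stated in full; the proofs are below) =====
def Claim_equal_reviews_section_py : Prop := ∀ (tool_results : List (String × List (List (String × String)))) (budget_tokens : Int), Dom_reviews_section_py tool_results budget_tokens → Pre_reviews_section_py tool_results budget_tokens → Spec_reviews_section_py tool_results budget_tokens (reviews_section_py tool_results budget_tokens)

-- ===== LEMMAS AND PROOFS =====

theorem pv_collect_eq (tool_results : List (String × List (List (String × String)))) :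
    tool_results.foldl (fun acc kv => if PySem.Str.startswith kv.1 "search_reviews" then acc ++ kv.2 else acc) [] = pvGathered tool_results := by
  have h : (fun (acc : List (List (String × String))) (kv : String × List (List (String × String))) => if PySem.Str.startswith kv.1 "search_reviews" then acc ++ kv.2 else acc)
      = fun acc kv => acc ++ (if PySem.Str.startswith kv.1 "search_reviews" then kv.2 else []) := by
    funext acc kv; split <;> simp
  rw [h, PySem.List.foldl_append_eq_flatMap, List.nil_append]
  unfold pvGathered
  induction tool_results with
  | nil => rfl
  | cons kv tl ih =>
      rw [List.flatMap_cons, List.filter_cons, ih]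
      by_cases hp : PySem.Str.startswith kv.1 "search_reviews"
      · rw [if_pos hp, if_pos hp, List.flatMap_cons]
      · rw [if_neg hp, if_neg hp, List.nil_append]

-- B's outer fold over tool_results equals one fold of pvStepB over the gathered reviews
theorem pv_outer_fold (tool_results : List (String × List (List (String × String))))
    (st : List String × List String × List String × Bool) :
    tool_results.foldl
      (fun st kv => if PySem.Str.startswith kv.1 "search_reviews" then kv.2.foldl pvStepB st else st) st =
    (pvGathered tool_results).foldl pvStepB st := by
  induction tool_results generalizing st with
  | nil => rfl
  | cons kv tl ih =>
      rw [List.foldl_cons, pvGathered, List.filter_cons]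
      by_cases hp : PySem.Str.startswith kv.1 "search_reviews"
      · rw [if_pos hp, if_pos hp, List.flatMap_cons, List.foldl_append, ih]
        rfl
      · rw [if_neg hp, if_neg hp, ih]
        rfl

-- the streaming loop's invariant: each buffer holds the rendered first-(cap − already held)
-- reviews of its sentiment, and seen records whether any review was visited
theorem pv_fold_inv (rs : List (List (String × String))) (pos neg neu : List String) (s : Bool) :
    rs.foldl pvStepB (pos, neg, neu, s) =
      (pos ++ ((rs.filter (fun r => pvLook r "sentiment" == some "positive")).take (3 - pos.length)).map
          (fun r => "  ✓ \"" ++ pvText r ++ "\"" ++ pvHeightSfx r),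
       neg ++ ((rs.filter (fun r => pvLook r "sentiment" == some "negative")).take (3 - neg.length)).map
          (fun r => "  ✗ \"" ++ pvText r ++ "\"" ++ pvHeightSfx r),
       neu ++ ((rs.filter (fun r => pvLook r "sentiment" == some "neutral")).take (2 - neu.length)).map
          (fun r => "  · \"" ++ pvText r ++ "\""),
       s || !rs.isEmpty) := by
  induction rs generalizing pos neg neu s with
  | nil => simp
  | cons r tl ih =>
      rw [List.foldl_cons]
      by_cases hpos : pvLook r "sentiment" = some "positive"
      · by_cases hl : pos.length < 3
        · have hstep : pvStepB (pos, neg, neu, s) r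
              = (pos ++ ["  ✓ \"" ++ pvText r ++ "\"" ++ pvHeightSfx r], neg, neu, true) := by
            simp [pvStepB, hpos, hl]
          rw [hstep, ih]
          have h3 : 3 - pos.length = (3 - (pos.length + 1)) + 1 := by omega
          simp [List.filter_cons, hpos, h3, List.take_succ_cons, List.append_assoc]
        · have hstep : pvStepB (pos, neg, neu, s) r = (pos, neg, neu, true) := by
            simp [pvStepB, hpos, hl]
          rw [hstep, ih]
          have h0 : 3 - pos.length = 0 := by omega
          simp [List.filter_cons, hpos, h0]
      · by_cases hneg : pvLook r "sentiment" = some "negative"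
        · by_cases hl : neg.length < 3
          · have hstep : pvStepB (pos, neg, neu, s) r
                = (pos, neg ++ ["  ✗ \"" ++ pvText r ++ "\"" ++ pvHeightSfx r], neu, true) := by
              simp [pvStepB, hpos, hneg, hl]
            rw [hstep, ih]
            have h3 : 3 - neg.length = (3 - (neg.length + 1)) + 1 := by omega
            simp [List.filter_cons, hpos, hneg, h3, List.take_succ_cons, List.append_assoc]
          · have hstep : pvStepB (pos, neg, neu, s) r = (pos, neg, neu, true) := by
              simp [pvStepB, hpos, hneg, hl]
            rw [hstep, ih]
            have h0 : 3 - neg.length = 0 := by omega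
            simp [List.filter_cons, hpos, hneg, h0]
        · by_cases hneu : pvLook r "sentiment" = some "neutral"
          · by_cases hl : neu.length < 2
            · have hstep : pvStepB (pos, neg, neu, s) r
                  = (pos, neg, neu ++ ["  · \"" ++ pvText r ++ "\""], true) := by
                simp [pvStepB, hpos, hneg, hneu, hl]
              rw [hstep, ih]
              have h2 : 2 - neu.length = (2 - (neu.length + 1)) + 1 := by omega
              simp [List.filter_cons, hpos, hneg, hneu, h2, List.take_succ_cons, List.append_assoc]
            · have hstep : pvStepB (pos, neg, neu, s) r = (pos, neg, neu, true) := by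
                simp [pvStepB, hpos, hneg, hneu, hl]
              rw [hstep, ih]
              have h0 : 2 - neu.length = 0 := by omega
              simp [List.filter_cons, hpos, hneg, hneu, h0]
          · have hstep : pvStepB (pos, neg, neu, s) r = (pos, neg, neu, true) := by
              simp [pvStepB, hpos, hneg, hneu]
            rw [hstep, ih]
            simp [List.filter_cons, hpos, hneg, hneu]

theorem pv_map_take3_ne_nil (f : List (String × String) → String)
    (l : List (List (String × String))) : (((l.take 3).map f) ≠ []) ↔ l ≠ [] := by
  simp [List.take_eq_nil_iff]

theorem pv_map_take2_ne_nil (f : List (String × String) → String)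
    (l : List (List (String × String))) : (((l.take 2).map f) ≠ []) ↔ l ≠ [] := by
  simp [List.take_eq_nil_iff]

-- ===== VERDICT (by name: the statement is the Claim_ definition above) =====
theorem reviews_section_py_spec : Claim_equal_reviews_section_py := by
  intro tool_results budget_tokens _hdom _hpre
  unfold Spec_reviews_section_py reviews_section_py reviews_section_py_alt
  rw [pv_collect_eq, pv_outer_fold, pv_fold_inv]
  simp only [List.nil_append, List.length_nil, Nat.sub_zero, Bool.false_or]
  by_cases hG : pvGathered tool_results = []
  · rw [if_pos hG]
    simp [hG]
  · rw [if_neg hG]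
    rw [if_neg (show ¬((!(pvGathered tool_results).isEmpty) = false) by simp [hG])]
    have hsl3 : ∀ (l : List (List (String × String))), PySem.List.slice l none (some 3) = l.take 3 := fun l => by simp [pysem]
    have hsl2 : ∀ (l : List (List (String × String))), PySem.List.slice l none (some 2) = l.take 2 := fun l => by simp [pysem]
    rw [hsl3, hsl3, hsl2]
    simp only [pv_map_take3_ne_nil, pv_map_take2_ne_nil]
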